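-- pv_equiv track=rewrite | github.com/GoogleGu/leetcode | lib/interview.py | transmute
-- ===== SOURCE A (Python) =====
-- def transmute(input):
--     result = []
--     for i, char in enumerate(input):
--         if char == '?':
--             result.extend(transmute(input[:i] + '1' + input[i+1:]))
--             result.extend(transmute(input[:i] + '0' + input[i+1:]))
--             return result
--     return [input]
-- ===== SOURCE B (Python) =====
-- from itertools import product
--
-- def transmute(input):
--     positions = [i for i, c in enumerate(input) if c == '?']
--     result = []
--     for combo in product('10', repeat=len(positions)):
--         chars = list(input)
--         for i, c in zip(positions, combo):
--             chars[i] = c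
--         result.append(''.join(chars))
--     return result
-- ===== Notes on version B (the rewrite author's own statement) =====
-- stated objective: idiomatic
-- what changed: A recurses on the whole string at each wildcard, re-slicing and re-scanning from the start; B scans once to collect the wildcard positions and enumerates all digit combinations itertools.product-style (digit one before digit zero), substituting each combination into the original string.
import Mathlib
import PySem

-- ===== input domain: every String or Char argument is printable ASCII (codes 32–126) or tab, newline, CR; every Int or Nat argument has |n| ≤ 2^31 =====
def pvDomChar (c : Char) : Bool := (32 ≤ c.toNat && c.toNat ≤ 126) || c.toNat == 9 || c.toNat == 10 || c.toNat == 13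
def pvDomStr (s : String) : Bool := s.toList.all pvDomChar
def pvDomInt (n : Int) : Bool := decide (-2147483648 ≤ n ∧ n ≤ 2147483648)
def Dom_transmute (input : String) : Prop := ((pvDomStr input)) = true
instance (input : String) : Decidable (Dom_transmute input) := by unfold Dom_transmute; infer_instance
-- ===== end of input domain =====

-- B replaces A's recursion (re-slicing the whole string at the first '?') by a single scan
-- collecting the '?' positions followed by an itertools.product-style enumeration; objective: idiomatic.

-- ===== PORT A =====
-- termination helper for the port: substituting a non-'?' char at a '?' position strictly
-- decreases the number of '?' characters
theorem pvCountSubstLt (cs : List Char) (i : Nat) (c : Char) (hi : i < cs.length)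
    (hq : cs[i] = '?') (hc : c ≠ '?') :
    (cs.take i ++ c :: cs.drop (i + 1)).count '?' < cs.count '?' := by
  conv_rhs => rw [← List.take_append_drop i cs]
  rw [← List.getElem_cons_drop hi, hq]
  simp [List.count_append, hc]

-- A: scan for the first '?' (the for-loop returns at the first hit); if found at i, recurse on
-- input[:i] + '1' + input[i+1:] and input[:i] + '0' + input[i+1:] (slices with 0 ≤ i: take/drop
-- is exact here), else return [input]. Strings are carried as List Char.
def transmuteCore (cs : List Char) : List (List Char) :=
  match h : List.findIdx? (fun ch => ch == '?') cs with
  | some i =>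
      transmuteCore (cs.take i ++ '1' :: cs.drop (i + 1)) ++
      transmuteCore (cs.take i ++ '0' :: cs.drop (i + 1))
  | none => [cs]
termination_by cs.count '?'
decreasing_by
  all_goals
    rw [List.findIdx?_eq_some_iff_getElem] at h
    obtain ⟨hi, hq, -⟩ := h
    exact pvCountSubstLt cs i _ hi (by simpa using hq) (by decide)

def transmute (input : String) : List String :=
  (transmuteCore input.toList).map String.ofList

-- ===== PORT B =====
-- [i for i, c in enumerate(input) if c == '?']
def qpositions (cs : List Char) : List Int :=
  ((PySem.List.enumerate cs 0).filter (fun p => p.2 == '?')).map (·.1)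

-- itertools.product('10', repeat=n) as lists: the first factor varies slowest, '1' before '0'
-- (ported by hand; PySem has no product primitive)
def prodTen : Nat → List (List Char)
  | 0 => [[]]
  | n + 1 => (['1', '0'] : List Char).flatMap (fun c => (prodTen n).map (fun t => c :: t))

-- chars = list(input); for i, c in zip(positions, combo): chars[i] = c   (indices from
-- enumerate are in range, so the total assignment pySetD is exact here)
def buildOne (cs : List Char) (ps : List Int) (combo : List Char) : List Char :=
  (ps.zip combo).foldl (fun acc pc => PySem.List.pySetD acc pc.1 pc.2) cs

def transmute_alt (input : String) : List String :=
  let cs := input.toList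
  let ps := qpositions cs
  (prodTen ps.length).map (fun combo => String.ofList (buildOne cs ps combo))

-- ===== PRECONDITION & SPEC =====
def Spec_transmute (input : String) (out : List String) : Prop := out = transmute_alt input
instance (input : String) (out : List String) : Decidable (Spec_transmute input out) := by unfold Spec_transmute; infer_instance

-- ===== CLAIM (what is proved, stated in full; the proofs are below) =====
def Claim_equal_transmute : Prop := ∀ (input : String), Dom_transmute input → Spec_transmute input (transmute input)

-- ===== LEMMAS AND PROOFS =====

-- proof-side recursive characterisation of qpositions, generalised over the start offset
def qposFrom (n : Int) : List Char → List Int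
  | [] => []
  | c :: cs => if c == '?' then n :: qposFrom (n + 1) cs else qposFrom (n + 1) cs

theorem qpositions_eq_qposFrom (cs : List Char) :
    ∀ n : Int, ((PySem.List.enumerate cs n).filter (fun p => p.2 == '?')).map (·.1)
      = qposFrom n cs := by
  induction cs with
  | nil => intro n; simp [PySem.List.enumerate_nil, qposFrom]
  | cons c cs ih =>
      intro n
      rw [PySem.List.enumerate_cons]
      by_cases hc : c = '?' <;> simp [qposFrom, hc, ih]

theorem qposFrom_append (t : List Char) (ht : ∀ c ∈ t, c ≠ '?') :
    ∀ (n : Int) (d : List Char), qposFrom n (t ++ d) = qposFrom (n + t.length) d := by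
  induction t with
  | nil => intro n d; simp
  | cons c t ih =>
      intro n d
      have hc : c ≠ '?' := ht c (by simp)
      have ht' : ∀ x ∈ t, x ≠ '?' := fun x hx => ht x (by simp [hx])
      rw [List.cons_append]
      show (if (c == '?') = true then n :: qposFrom (n + 1) (t ++ d)
            else qposFrom (n + 1) (t ++ d)) = _
      rw [if_neg (by simpa using hc), ih ht']
      congr 1
      simp only [List.length_cons]
      omega

-- one step of buildOne: consuming the head of positions/combo performs the assignment
theorem buildOne_cons (cs : List Char) (i : Int) (ps : List Int) (c : Char) (combo : List Char) :
    buildOne cs (i :: ps) (c :: combo) = buildOne (PySem.List.pySetD cs i c) ps combo := by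
  simp [buildOne]

theorem pySetD_mid (t d : List Char) (x c : Char) :
    PySem.List.pySetD (t ++ x :: d) ((t.length : Int)) c = t ++ c :: d := by
  rw [PySem.List.pySetD_natCast, List.set_append]
  simp

-- the core equivalence, by strong induction on the number of '?'
theorem core_eq (cs : List Char) :
    transmuteCore cs = (prodTen (qpositions cs).length).map (buildOne cs (qpositions cs)) := by
  generalize hk : cs.count '?' = k
  induction k using Nat.strong_induction_on generalizing cs with
  | _ k IH =>
  rw [transmuteCore]
  split
  · rename_i i hfind
    rw [List.findIdx?_eq_some_iff_getElem] at hfind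
    obtain ⟨hi, hq, hfirst⟩ := hfind
    have hq : cs[i] = '?' := by simpa using hq
    set t := cs.take i with htdef
    set d := cs.drop (i + 1) with hddef
    have hlen : t.length = i := by simp [htdef, Nat.min_eq_left (Nat.le_of_lt hi)]
    have hcs : cs = t ++ '?' :: d := by
      conv_lhs => rw [← List.take_append_drop i cs]
      rw [← List.getElem_cons_drop hi, hq]
    have htq : ∀ c ∈ t, c ≠ '?' := by
      intro c hc
      rw [List.mem_iff_getElem] at hc
      obtain ⟨j, hj, hje⟩ := hc
      have hji : j < i := by simpa [hlen] using hj
      have hcj : ¬ cs[j]'(Nat.lt_trans hji hi) = '?' := by simpa using hfirst j hji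
      have hte : t[j] = cs[j]'(Nat.lt_trans hji hi) := by
        simp [htdef, List.getElem_take]
      rw [← hje, hte]
      exact hcj
    have hqpos : ∀ x : Char, qpositions (t ++ x :: d)
        = (if x = '?' then [(i : Int)] else []) ++ qposFrom ((i : Int) + 1) d := by
      intro x
      rw [qpositions, qpositions_eq_qposFrom, qposFrom_append t htq]
      by_cases hx : x = '?' <;> simp [qposFrom, hx, hlen]
    have hsub : ∀ c : Char, ∀ combo,
        buildOne (t ++ '?' :: d) ((i : Int) :: qposFrom ((i : Int) + 1) d) (c :: combo)
          = buildOne (t ++ c :: d) (qposFrom ((i : Int) + 1) d) combo := by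
      intro c combo
      rw [buildOne_cons, ← hlen, pySetD_mid]
    have hIH : ∀ c : Char, c ≠ '?' → transmuteCore (t ++ c :: d)
        = (prodTen (qpositions (t ++ c :: d)).length).map
            (buildOne (t ++ c :: d) (qpositions (t ++ c :: d))) := by
      intro c hc
      apply IH _ _ _ rfl
      rw [← hk, hcs]
      simp [List.count_append, hc]
    rw [hIH '1' (by decide), hIH '0' (by decide)]
    conv_rhs => rw [hcs]
    rw [hqpos '1', hqpos '0', hqpos '?']
    simp only [if_true, if_neg (by decide : ('1' : Char) ≠ '?'),
      if_neg (by decide : ('0' : Char) ≠ '?'), List.nil_append, List.singleton_append,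
      List.length_cons]
    rw [prodTen]
    simp only [List.flatMap_cons, List.flatMap_nil, List.append_nil, List.map_append,
      List.map_map]
    congr 1 <;> apply List.map_congr_left <;> intro combo _ <;>
      simp only [Function.comp_apply] <;> exact (hsub _ combo).symm
  · rename_i hfind
    have hno : ∀ c ∈ cs, c ≠ '?' := by
      intro c hc
      have := List.findIdx?_eq_none_iff.mp hfind c hc
      simpa using this
    have hq : qpositions cs = [] := by
      rw [qpositions, qpositions_eq_qposFrom]
      have := qposFrom_append cs hno 0 []
      simpa [qposFrom] using this
    simp [hq, prodTen, buildOne]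

-- ===== VERDICT (by name: the statement is the Claim_ definition above) =====
theorem transmute_spec : Claim_equal_transmute := by
  intro input _
  unfold Spec_transmute transmute transmute_alt
  rw [core_eq]
  simp [List.map_map]
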